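-- pv_equiv track=rewrite | github.com/zachjbrowning/cs6441-ciphers | ciphers/transposition.py | transpositionCiphering
-- ===== SOURCE A (Python) =====
-- import math as m
--
-- def bestMatrix(length):
--     square = m.ceil(m.sqrt(length))
--     if square * (square - 1) >= length:
--         return square, square - 1
--     else:
--         return square, square
--
-- def makeMatrix(message):
--     rows, columns = bestMatrix(len(message))
--     message += ' ' * (rows * columns - len(message))
--     msgMatrix = []
--     for i in range(rows):
--         msgMatrix.append(list(message[i * columns : (i + 1) * columns]))
--
--     return msgMatrix, rows, columns
--
-- def makeOrder(key, rows, columns):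
--     for letter in key:
--         if not letter.isalpha():
--             raise KeyError("Key must be alphabetic only!")
--     rowkey = list((key * m.ceil(rows / len(key)))[:rows])
--     rowkey.reverse()
--     uniqueRowkey = []
--     for i in range(len(rowkey)):
--         uniqueRowkey.insert(0, rowkey.pop() + str(i))
--     colkey = list((key * m.ceil(columns / len(key)))[:columns])
--     uniqueColkey = []
--     for i in range(len(colkey)):
--         uniqueColkey.insert(0, colkey.pop() + str(i))
--
--     ordColkey = sorted([x for x in uniqueColkey])
--     ordRowkey = sorted([x for x in uniqueRowkey])
--     colorder = []
--     for item in ordColkey: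
--         colorder.append(uniqueColkey.index(item))
--     roworder = []
--     for item in ordRowkey:
--         roworder.append(uniqueRowkey.index(item))
--     return roworder, colorder
--
-- def matrixSwap(matrix, roworder, colorder, decode):
--     index_max = len(colorder) * len(roworder)
--     new_matrix = [['' for x in range(len(colorder))] for y in range(len(roworder))]
--
--     for k in range(index_max):
--         i = k // len(colorder)
--         j = k % len(colorder)
--         if decode:
--             new_matrix[i][j] += matrix[roworder[i]][colorder[j]]
--         else:
--             new_matrix[roworder[i]][colorder[j]] += matrix[i][j]
--     return new_matrix
--
-- def transpositionCiphering(key, message, decode):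
--     matrix, rows, columns = makeMatrix(message)
--     roworder, colorder = makeOrder(key, rows, columns)
--     codedMatrix = matrixSwap(matrix, roworder, colorder, decode)
--     codedMessage = ''
--     for row in codedMatrix:
--         codedMessage += ''.join(row)
--
--     return codedMessage
-- ===== SOURCE B (Python) =====
-- import math as m
--
--
-- def bestMatrix(length):
--     square = m.ceil(m.sqrt(length))
--     if square * (square - 1) >= length:
--         return square, square - 1
--     return square, square
--
--
-- def _invert(perm):
--     inv = [0] * len(perm)
--     for i, v in enumerate(perm):
--         inv[v] = i
--     return inv
--
--
-- def _keyOrders(key, rows, columns):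
--     for letter in key:
--         if not letter.isalpha():
--             raise KeyError("Key must be alphabetic only!")
--     reprow = (key * m.ceil(rows / len(key)))[:rows]
--     repcol = (key * m.ceil(columns / len(key)))[:columns]
--     roworder = sorted(range(rows), key=lambda t: reprow[rows - 1 - t] + str(rows - 1 - t))
--     colorder = sorted(range(columns), key=lambda j: repcol[j] + str(columns - 1 - j))
--     return roworder, colorder
--
--
-- def transpositionCiphering(key, message, decode):
--     rows, columns = bestMatrix(len(message))
--     roworder, colorder = _keyOrders(key, rows, columns)
--     if not decode:
--         roworder = _invert(roworder)
--         colorder = _invert(colorder)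
--     padded = message.ljust(rows * columns)
--     pieces = []
--     for r in roworder:
--         row = padded[r * columns:(r + 1) * columns]
--         pieces.append(''.join(row[c] for c in colorder))
--     return ''.join(pieces)
-- ===== Notes on version B (the rewrite author's own statement) =====
-- stated objective: faster
-- what changed: B replaces A's scatter strategy (build a 2D grid of lists, one k-loop writing every cell through roworder/colorder into a mutable nested list, then re-join) by an inverse-permutation gather: the key orders come from sorted(range(n), key=label) with no repeated .index scans and no reverse/pop/insert loops, the encode direction explicitly inverts the two permutations, and the output is built by two staged gather passes (pick rows by slicing, then pick characters inside each row).
import Mathlib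
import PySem

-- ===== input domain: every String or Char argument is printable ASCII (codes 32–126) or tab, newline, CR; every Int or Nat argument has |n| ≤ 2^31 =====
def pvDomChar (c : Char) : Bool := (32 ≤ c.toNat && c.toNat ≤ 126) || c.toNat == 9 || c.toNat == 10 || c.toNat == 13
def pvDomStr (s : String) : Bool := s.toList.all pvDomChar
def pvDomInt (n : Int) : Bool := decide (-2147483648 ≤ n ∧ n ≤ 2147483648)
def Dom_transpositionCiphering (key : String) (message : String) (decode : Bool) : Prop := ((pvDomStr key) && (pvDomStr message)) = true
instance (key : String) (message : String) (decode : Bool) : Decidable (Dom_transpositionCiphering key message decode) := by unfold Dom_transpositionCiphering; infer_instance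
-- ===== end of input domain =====

-- B replaces A's grid-scatter (2D matrix mutated cell by cell through matrixSwap, argsort via
-- repeated .index scans) by sorted-range key orders, explicit permutation inversion on encode,
-- and two staged gather passes; same return value on every key the Python accepts.

-- ===== PORT A =====
-- integer form of Python's m.ceil(m.sqrt(length)); exact on the admitted domain
def pvCeilSqrt (n : Nat) : Int :=
  let r := Nat.sqrt n
  if r * r = n then (r : Int) else (r : Int) + 1

-- integer form of m.ceil(a / b); b = 0 is Python's ZeroDivisionError for key = "" (excluded by Pre_)
def pvCeilDiv (a b : Int) : Int := -(PySem.Int.floordiv (-a) b)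

def pvBestMatrix (length : Nat) : Int × Int :=
  let square := pvCeilSqrt length
  if square * (square - 1) ≥ (length : Int) then (square, square - 1) else (square, square)

def pvMakeMatrix (message : List Char) : List (List Char) × Int × Int :=
  let p := pvBestMatrix message.length
  let message2 := message ++ List.replicate (p.1 * p.2 - (message.length : Int)).toNat ' '
  let msgMatrix := (PySem.List.pyRange 0 p.1 1).foldl
      (fun acc i => acc ++ [PySem.List.slice message2 (some (i * p.2)) (some ((i + 1) * p.2))]) []
  (msgMatrix, p.1, p.2)

-- loop body of `uniqueRowkey.insert(0, rowkey.pop() + str(i))` (and its colkey twin)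
def pvPopStep (st : List Char × List (List Char)) (i : Int) : List Char × List (List Char) :=
  match PySem.List.pop? st.1 (-1) with
  | some (c, rest) => (rest, PySem.List.insert st.2 0 (c :: PySem.Int.toChars i))
  | none => st  -- pop from an empty list: unreachable (the range has exactly the list's length)

def pvMakeOrder (key : List Char) (rows columns : Int) : List Nat × List Nat :=
  -- the Python key check raises KeyError on non-alphabetic keys (and "" raises ZeroDivisionError): excluded by Pre_
  let rowkey := (PySem.List.slice (PySem.List.pyRepeat key (pvCeilDiv rows (key.length : Int))) none (some rows)).reverse
  let st := (PySem.List.pyRange 0 (rowkey.length : Int) 1).foldl pvPopStep (rowkey, [])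
  let uniqueRowkey := st.2
  let colkey := PySem.List.slice (PySem.List.pyRepeat key (pvCeilDiv columns (key.length : Int))) none (some columns)
  let st2 := (PySem.List.pyRange 0 (colkey.length : Int) 1).foldl pvPopStep (colkey, [])
  let uniqueColkey := st2.2
  let ordColkey := PySem.List.sorted (uniqueColkey.foldl (fun acc x => acc ++ [x]) []) (fun x => x) false
  let ordRowkey := PySem.List.sorted (uniqueRowkey.foldl (fun acc x => acc ++ [x]) []) (fun x => x) false
  let colorder := ordColkey.foldl (fun acc item => acc ++ [(PySem.List.index? uniqueColkey item).getD 0]) []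
  let roworder := ordRowkey.foldl (fun acc item => acc ++ [(PySem.List.index? uniqueRowkey item).getD 0]) []
  (roworder, colorder)

-- matrix[a][b], a 1-character string; IndexError (none) is unreachable on admitted inputs
def pvGet2 (mat : List (List Char)) (a b : Int) : List Char :=
  match PySem.List.pyGet? mat a with
  | some row => match PySem.List.pyGet? row b with
    | some ch => [ch]
    | none => []
  | none => []

-- new_matrix[a][b] = f(new_matrix[a][b]); a,b are nonnegative and in range on admitted inputs
def pvModify2 (nm : List (List (List Char))) (a b : Int) (f : List Char → List Char) : List (List (List Char)) :=
  if 0 ≤ a ∧ 0 ≤ b then nm.modify a.toNat (fun row => row.modify b.toNat f) else nm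

def pvMatrixSwap (matrix : List (List Char)) (roworder colorder : List Nat) (decode : Bool) :
    List (List (List Char)) :=
  let index_max := colorder.length * roworder.length
  let new0 : List (List (List Char)) :=
    (PySem.List.pyRange 0 (roworder.length : Int) 1).map
      (fun _ => (PySem.List.pyRange 0 (colorder.length : Int) 1).map (fun _ => ([] : List Char)))
  (PySem.List.pyRange 0 (index_max : Int) 1).foldl
    (fun nm k =>
      let i := PySem.Int.floordiv k (colorder.length : Int)
      let j := PySem.Int.mod k (colorder.length : Int)
      if decode then
        pvModify2 nm i j
          (fun cell => cell ++ pvGet2 matrix ((PySem.List.pyGet? roworder i).getD 0 : Nat)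
                                            ((PySem.List.pyGet? colorder j).getD 0 : Nat))
      else
        pvModify2 nm ((PySem.List.pyGet? roworder i).getD 0 : Nat)
                     ((PySem.List.pyGet? colorder j).getD 0 : Nat)
          (fun cell => cell ++ pvGet2 matrix i j)) new0

def transpositionCiphering (key : String) (message : String) (decode : Bool) : String :=
  let r := pvMakeMatrix message.toList
  let o := pvMakeOrder key.toList r.2.1 r.2.2
  let codedMatrix := pvMatrixSwap r.1 o.1 o.2 decode
  String.ofList (codedMatrix.foldl (fun acc row => acc ++ row.flatten) [])

-- ===== PORT B =====
-- inv = [0]*len(perm); for i, v in enumerate(perm): inv[v] = i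
def pvInvert (perm : List Int) : List Int :=
  (PySem.List.enumerate perm).foldl (fun inv iv => PySem.List.pySetD inv iv.2 iv.1)
    (List.replicate perm.length (0 : Int))

-- sorted(range(n), key=label); the KeyError on a non-alphabetic key (and the
-- ZeroDivisionError on "") are excluded by Pre_
def pvKeyOrders (key : List Char) (rows columns : Int) : List Int × List Int :=
  let reprow := PySem.List.slice (PySem.List.pyRepeat key (pvCeilDiv rows (key.length : Int))) none (some rows)
  let repcol := PySem.List.slice (PySem.List.pyRepeat key (pvCeilDiv columns (key.length : Int))) none (some columns)
  let roworder := PySem.List.sorted (PySem.List.pyRange 0 rows 1)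
      (fun t => ((PySem.List.pyGet? reprow (rows - 1 - t)).getD ' ') :: PySem.Int.toChars (rows - 1 - t)) false
  let colorder := PySem.List.sorted (PySem.List.pyRange 0 columns 1)
      (fun j => ((PySem.List.pyGet? repcol j).getD ' ') :: PySem.Int.toChars (columns - 1 - j)) false
  (roworder, colorder)

-- ''.join(padded[r*columns:(r+1)*columns][c] for c in colorder); IndexError unreachable on admitted inputs
def pvRowPiece (padded : List Char) (colorder : List Int) (columns r : Int) : List Char :=
  let row := PySem.List.slice padded (some (r * columns)) (some ((r + 1) * columns))
  colorder.foldl (fun s c =>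
    s ++ (match PySem.List.pyGet? row c with | some ch => [ch] | none => [])) []

def transpositionCiphering_alt (key : String) (message : String) (decode : Bool) : String :=
  let msg := message.toList
  let p := pvBestMatrix msg.length
  let o := pvKeyOrders key.toList p.1 p.2
  let ro := if decode then o.1 else pvInvert o.1
  let co := if decode then o.2 else pvInvert o.2
  let padded := msg ++ List.replicate (p.1 * p.2 - (msg.length : Int)).toNat ' '  -- message.ljust(rows*columns)
  let pieces := ro.foldl (fun acc r => acc ++ [pvRowPiece padded co p.2 r]) []
  String.ofList pieces.flatten

-- ===== PRECONDITION & SPEC =====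
-- Pre_ is exactly "key.isalpha()": on any other key (empty or with a non-alphabetic character)
-- the Python A raises (KeyError, or ZeroDivisionError for "") and returns nothing.
def Pre_transpositionCiphering (key : String) (message : String) (decode : Bool) : Prop :=
  PySem.Str.strIsalpha key = true
instance (key : String) (message : String) (decode : Bool) : Decidable (Pre_transpositionCiphering key message decode) := by
  unfold Pre_transpositionCiphering; infer_instance

def pvWitness_transpositionCiphering : String × String × Bool := ("cab", "hello world", false)

def Spec_transpositionCiphering (key : String) (message : String) (decode : Bool) (out : String) : Prop :=
  out = transpositionCiphering_alt key message decode
instance (key : String) (message : String) (decode : Bool) (out : String) : Decidable (Spec_transpositionCiphering key message decode out) := by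
  unfold Spec_transpositionCiphering; infer_instance

-- ===== CLAIM (what is proved, stated in full; the proofs are below) =====
def Claim_equal_transpositionCiphering : Prop := ∀ (key : String) (message : String) (decode : Bool), Dom_transpositionCiphering key message decode → Pre_transpositionCiphering key message decode → Spec_transpositionCiphering key message decode (transpositionCiphering key message decode)

-- ===== LEMMAS AND PROOFS =====

-- § str(i) is injective for i ≥ 0

lemma pv_digitChar_inj : ∀ x < 10, ∀ y < 10, Nat.digitChar x = Nat.digitChar y → x = y := by decide

lemma pv_map_digitChar_inj : ∀ (l1 l2 : List Nat), (∀ x ∈ l1, x < 10) → (∀ x ∈ l2, x < 10) →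
    l1.map Nat.digitChar = l2.map Nat.digitChar → l1 = l2 := by
  intro l1
  induction l1 with
  | nil => intro l2 _ _ h; cases l2 <;> simp_all
  | cons a t ih =>
    intro l2 h1 h2 h
    cases l2 with
    | nil => simp_all
    | cons b t2 =>
      simp only [List.map_cons, List.cons.injEq] at h
      have := pv_digitChar_inj a (by simp_all) b (by simp_all) h.1
      have := ih t2 (fun x hx => h1 x (by simp [hx])) (fun x hx => h2 x (by simp [hx])) h.2
      simp_all

lemma pv_toDigitsCore_eq (b : Nat) (hb : 2 ≤ b) :
    ∀ (f n : Nat) (ds : List Char), 0 < f → n < b ^ f →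
    Nat.toDigitsCore b f n ds =
      (if n = 0 then ['0'] else ((Nat.digits b n).map Nat.digitChar).reverse) ++ ds := by
  intro f
  induction f with
  | zero => intro n ds h; omega
  | succ f ih =>
    intro n ds _ hlt
    rw [Nat.toDigitsCore]
    by_cases hnb : n / b = 0
    · simp only [hnb, if_true]
      by_cases hn0 : n = 0
      · subst hn0; simp [Nat.digitChar]
      · have hnlt : n < b := Nat.lt_of_div_eq_zero (by omega) hnb
        rw [if_neg hn0, Nat.digits_def' (by omega : 1 < b) (by omega : 0 < n), hnb]
        simp [Nat.mod_eq_of_lt hnlt]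
    · simp only [hnb, if_false]
      have hf : 0 < f := by
        by_contra h0
        have : f = 0 := by omega
        subst this
        simp [pow_one] at hlt
        exact hnb (Nat.div_eq_of_lt hlt)
      have hdiv : n / b < b ^ f := by
        apply Nat.div_lt_of_lt_mul
        rwa [← pow_succ']
      rw [ih (n / b) _ hf hdiv]
      have hn0 : n ≠ 0 := fun h => hnb (by simp [h])
      rw [Nat.digits_def' (by omega : 1 < b) (by omega : 0 < n)]
      simp [hnb, hn0]

lemma pv_digits_ne_zero_of_map_eq_single_zero (n : Nat)
    (h : (Nat.digits 10 n).map Nat.digitChar = ['0']) : n = 0 := by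
  have h2 : (([0] : List Nat).map Nat.digitChar) = ['0'] := by decide
  have hd : Nat.digits 10 n = [0] :=
    pv_map_digitChar_inj _ [0] (fun x hx => Nat.digits_lt_base (by omega) hx) (by simp)
      (h.trans h2.symm)
  have := Nat.ofDigits_digits 10 n
  rw [hd] at this
  simpa [Nat.ofDigits] using this.symm

lemma pv_toDigits_inj (a b : Nat) (h : Nat.toDigits 10 a = Nat.toDigits 10 b) : a = b := by
  have ha : a < 10 ^ (a + 1) := lt_of_lt_of_le (Nat.lt_pow_self (by omega)) (Nat.pow_le_pow_right (by omega) (by omega))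
  have hbb : b < 10 ^ (b + 1) := lt_of_lt_of_le (Nat.lt_pow_self (by omega)) (Nat.pow_le_pow_right (by omega) (by omega))
  rw [Nat.toDigits, Nat.toDigits,
      pv_toDigitsCore_eq 10 (by omega) _ _ _ (by omega) ha,
      pv_toDigitsCore_eq 10 (by omega) _ _ _ (by omega) hbb] at h
  simp only [List.append_nil] at h
  by_cases ha0 : a = 0 <;> by_cases hb0 : b = 0
  · omega
  · exfalso
    rw [if_pos ha0, if_neg hb0] at h
    have h1 : (Nat.digits 10 b).map Nat.digitChar = ['0'] := by
      have := congrArg List.reverse h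
      simpa using this.symm
    exact hb0 (pv_digits_ne_zero_of_map_eq_single_zero b h1)
  · exfalso
    rw [if_neg ha0, if_pos hb0] at h
    have h1 : (Nat.digits 10 a).map Nat.digitChar = ['0'] := by
      have := congrArg List.reverse h
      simpa using this
    exact ha0 (pv_digits_ne_zero_of_map_eq_single_zero a h1)
  · rw [if_neg ha0, if_neg hb0] at h
    have h' : (Nat.digits 10 a).map Nat.digitChar = (Nat.digits 10 b).map Nat.digitChar := by
      have := congrArg List.reverse h
      simpa using this
    exact Nat.digits_inj_iff.mp (pv_map_digitChar_inj _ _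
      (fun x hx => Nat.digits_lt_base (by omega) hx) (fun x hx => Nat.digits_lt_base (by omega) hx) h')

lemma pv_toChars_inj {i j : Int} (hi : 0 ≤ i) (hj : 0 ≤ j)
    (h : PySem.Int.toChars i = PySem.Int.toChars j) : i = j := by
  unfold PySem.Int.toChars at h
  rw [if_neg (by omega), if_neg (by omega)] at h
  have := pv_toDigits_inj _ _ h
  omega

-- § length of (key * ceil(n/len(key)))[:n]
lemma pv_rep_length (key : List Char) (n : Int) (hk : 0 < key.length) (hn : 0 ≤ n) :
    (PySem.List.slice (PySem.List.pyRepeat key (pvCeilDiv n (key.length : Int))) none (some n)).length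
      = n.toNat := by
  rw [PySem.List.slice_to _ hn, List.length_take]
  have hrep : (PySem.List.pyRepeat key (pvCeilDiv n (key.length : Int))).length
      = (pvCeilDiv n (key.length : Int)).toNat * key.length := by
    simp [PySem.List.pyRepeat]
  rw [hrep]
  set q := pvCeilDiv n (key.length : Int) with hq
  have hmul : n ≤ q * key.length := by
    have h1 := PySem.Int.floordiv_mul_add_mod (-n) (key.length : Int)
    have h2 := PySem.Int.mod_nonneg (-n) (by exact_mod_cast hk : (0:Int) < (key.length : Int))
    have : q * key.length = -(PySem.Int.floordiv (-n) (key.length : Int)) * key.length := by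
      rw [hq]; rfl
    nlinarith [this]
  by_cases hq0 : 0 ≤ q
  · have : (n.toNat : Int) ≤ (q.toNat * key.length : Int) := by
      push_cast
      rw [Int.toNat_of_nonneg hn, Int.toNat_of_nonneg hq0]
      exact hmul
    omega
  · have hle : q * key.length ≤ 0 :=
      mul_nonpos_of_nonpos_of_nonneg (by omega) (by positivity)
    have : n ≤ 0 := le_trans hmul hle
    omega

-- § the pop/insert loop of makeOrder, in closed form
lemma pv_poploop_aux (l : List Char) :
    ∀ m ≤ l.length,
    ((List.range m).foldl (fun st (t : Nat) => pvPopStep st (t : Int)) (l, [])) =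
      (l.take (l.length - m),
       ((List.range m).map
         (fun t => l.getD (l.length - 1 - t) ' ' :: PySem.Int.toChars (t : Int))).reverse) := by
  intro m
  induction m with
  | zero => intro _; simp
  | succ m ih =>
    intro hm
    rw [List.range_succ, List.foldl_append, ih (by omega)]
    have hlt : l.length - m - 1 < l.length := by omega
    have htake : l.take (l.length - m) = l.take (l.length - m - 1) ++ [l.getD (l.length - m - 1) ' '] := by
      have hs : l.length - m = (l.length - m - 1) + 1 := by omega
      rw [hs, List.take_add_one, List.getD_eq_getElem?_getD, List.getElem?_eq_getElem hlt]
      simp [List.getElem?_eq_getElem hlt]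
    simp only [List.foldl_cons, List.foldl_nil, pvPopStep, htake, PySem.List.pop?_last]
    rw [List.map_append, List.reverse_append, PySem.List.insert_zero]
    simp only [List.map_cons, List.map_nil, List.reverse_cons, List.reverse_nil,
      List.nil_append, List.singleton_append, Prod.mk.injEq, List.cons.injEq]
    rw [show l.length - m - 1 = l.length - (m + 1) from by omega,
        show l.length - (m + 1) = l.length - 1 - m from by omega]
    simp

lemma pv_poploop (l : List Char) :
    ((PySem.List.pyRange 0 (l.length : Int) 1).foldl pvPopStep (l, [])).2 =
      ((List.range l.length).map
        (fun t => l.getD (l.length - 1 - t) ' ' :: PySem.Int.toChars (t : Int))).reverse := by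
  rw [PySem.List.pyRange_zero_natCast l.length, List.foldl_map, pv_poploop_aux l l.length le_rfl]

-- § the two unique key-label lists (proof-side names)
def pvUR (rep : List Char) (r : Int) : List (List Char) :=
  ((PySem.List.pyRange 0 r 1).map
    (fun t => ((PySem.List.pyGet? rep t).getD ' ') :: PySem.Int.toChars t)).reverse

def pvUC (rep : List Char) (c : Int) : List (List Char) :=
  (PySem.List.pyRange 0 c 1).map
    (fun j => ((PySem.List.pyGet? rep j).getD ' ') :: PySem.Int.toChars (c - 1 - j))

-- A's argsort: [u.index(x) for x in sorted(u)]
def pvArgsort (u : List (List Char)) : List Nat :=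
  (PySem.List.sorted u (fun x => x) false).map (fun x => (PySem.List.index? u x).getD 0)

lemma pv_uniqueRowkey_eq (rep : List Char) :
    ((PySem.List.pyRange 0 ((rep.reverse).length : Int) 1).foldl pvPopStep (rep.reverse, [])).2 =
    pvUR rep (rep.length : Int) := by
  unfold pvUR
  rw [pv_poploop, PySem.List.pyRange_zero_natCast rep.length, List.map_map]
  simp only [List.length_reverse]
  congr 1
  apply List.map_congr_left
  intro t ht
  simp only [List.mem_range, List.length_reverse] at ht ⊢
  simp only [Function.comp]
  rw [PySem.List.pyGet?_natCast, List.getD_eq_getElem?_getD]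
  rw [List.getElem?_eq_getElem (by simp; omega : rep.length - 1 - t < rep.reverse.length),
      List.getElem?_eq_getElem (by omega : t < rep.length)]
  simp only [Option.getD_some, List.getElem_reverse]
  congr 2
  omega

lemma pv_uniqueColkey_eq (rep : List Char) (c : Int) (hc : c = (rep.length : Int)) :
    ((PySem.List.pyRange 0 ((rep.length : Int)) 1).foldl pvPopStep (rep, [])).2 =
    pvUC rep c := by
  subst hc
  unfold pvUC
  rw [pv_poploop, PySem.List.pyRange_zero_natCast rep.length, List.map_map]
  apply List.ext_getElem
  · simp
  · intro j hj hj2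
    simp only [List.length_reverse, List.length_map, List.length_range] at hj hj2
    rw [List.getElem_reverse]
    simp only [List.getElem_map, List.getElem_range, Function.comp]
    rw [PySem.List.pyGet?_natCast]
    simp only [List.length_map, List.length_range]
    rw [List.getD_eq_getElem?_getD, List.getElem?_eq_getElem (by omega : j < rep.length)]
    rw [show rep.length - 1 - (rep.length - 1 - j) = j from by omega,
        List.getElem?_eq_getElem hj]
    simp only [Option.getD_some]
    congr 1
    congr 1
    omega

lemma pv_makeOrder_eq (key : List Char) (rows columns : Int) (hk : 0 < key.length)
    (hr : 0 ≤ rows) (hc : 0 ≤ columns ∨ columns = -1) :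
    pvMakeOrder key rows columns =
      (pvArgsort (pvUR (PySem.List.slice (PySem.List.pyRepeat key (pvCeilDiv rows (key.length : Int))) none (some rows)) rows),
       pvArgsort (pvUC (PySem.List.slice (PySem.List.pyRepeat key (pvCeilDiv columns (key.length : Int))) none (some columns)) columns)) := by
  have hrowlen : ((PySem.List.slice (PySem.List.pyRepeat key (pvCeilDiv rows (key.length : Int))) none (some rows)).length : Int) = rows := by
    rw [pv_rep_length key rows hk hr]; omega
  simp only [pvMakeOrder, pvArgsort]
  rw [pv_uniqueRowkey_eq]
  rcases hc with hc | hc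
  · have hcollen : columns = ((PySem.List.slice (PySem.List.pyRepeat key (pvCeilDiv columns (key.length : Int))) none (some columns)).length : Int) := by
      rw [pv_rep_length key columns hk hc]; omega
    rw [pv_uniqueColkey_eq _ columns hcollen]
    simp only [PySem.List.foldl_append_singleton, List.nil_append,
      PySem.List.foldl_append_singleton_eq_map, hrowlen]
  · subst hc
    have hq : pvCeilDiv (-1) (key.length : Int) ≤ 0 := by
      have := PySem.Int.floordiv_mul_add_mod (1 : Int) (key.length : Int)
      have h2 := PySem.Int.mod_nonneg (1 : Int) (by exact_mod_cast hk : (0:Int) < (key.length : Int))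
      have h3 := PySem.Int.mod_lt (1 : Int) (by exact_mod_cast hk : (0:Int) < (key.length : Int))
      unfold pvCeilDiv
      simp only [neg_neg]
      nlinarith
    have hrep : PySem.List.pyRepeat key (pvCeilDiv (-1) (key.length : Int)) = [] := by
      unfold PySem.List.pyRepeat
      rw [show (pvCeilDiv (-1) (key.length : Int)).toNat = 0 from by omega]
      simp
    have hcol : PySem.List.slice (PySem.List.pyRepeat key (pvCeilDiv (-1) (key.length : Int))) none (some (-1)) = ([] : List Char) := by
      rw [hrep, PySem.List.slice_to_neg_one]
      simp
    have hrange : PySem.List.pyRange 0 (-1) 1 = [] := by decide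
    rw [hcol]
    rw [show PySem.List.pyRange 0 ((List.length ([] : List Char) : Nat) : Int) 1 = [] from by decide]
    unfold pvUC
    rw [hrange]
    simp only [List.foldl_nil, List.map_nil,
      PySem.List.foldl_append_singleton, List.nil_append,
      PySem.List.foldl_append_singleton_eq_map, hrowlen]

-- § argsort of a duplicate-free list is a permutation of range
lemma pv_index?_getElem (u : List (List Char)) (hu : u.Nodup) (i : Nat) (hi : i < u.length) :
    PySem.List.index? u u[i] = some i := by
  rw [PySem.List.index?_eq_idxOf?, List.idxOf?_eq_some_iff]
  exact ⟨hi, rfl, fun j hj => by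
    intro heq
    exact absurd (List.Nodup.getElem_inj_iff hu |>.mp heq) (by omega)⟩

lemma pv_map_index_eq_range (u : List (List Char)) (hu : u.Nodup) :
    u.map (fun x => (PySem.List.index? u x).getD 0) = List.range u.length := by
  apply List.ext_getElem
  · simp
  · intro i hi hi2
    simp only [List.getElem_map, List.getElem_range]
    rw [pv_index?_getElem u hu i (by simpa using hi)]
    rfl

lemma pv_argsort_perm (u : List (List Char)) (hu : u.Nodup) :
    (pvArgsort u).Perm (List.range u.length) := by
  unfold pvArgsort
  rw [← pv_map_index_eq_range u hu]
  exact (PySem.List.sorted_perm u (fun x => x) false).map _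

lemma pv_argsort_length (u : List (List Char)) : (pvArgsort u).length = u.length := by
  simp [pvArgsort, PySem.List.length_sorted]

-- § the unique key lists have no duplicates (the str(i) suffixes differ)
lemma pv_uniqueRow_nodup (rep : List Char) (rn : Nat) : (pvUR rep (rn : Int)).Nodup := by
  unfold pvUR
  rw [List.nodup_reverse, PySem.List.pyRange_zero_natCast, List.map_map]
  apply (List.nodup_map_iff_inj_on (List.nodup_range)).mpr
  intro x hx y hy h
  simp only [Function.comp, List.cons.injEq] at h
  have := pv_toChars_inj (by positivity) (by positivity) h.2
  exact_mod_cast this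

lemma pv_uniqueCol_nodup (rep : List Char) (cn : Nat) : (pvUC rep ((cn : Nat) : Int)).Nodup := by
  unfold pvUC
  rw [PySem.List.pyRange_zero_natCast, List.map_map]
  apply (List.nodup_map_iff_inj_on (List.nodup_range)).mpr
  intro x hx y hy h
  simp only [List.mem_range] at hx hy
  simp only [Function.comp, List.cons.injEq] at h
  have := pv_toChars_inj (by omega : (0:Int) ≤ (cn : Int) - 1 - (x : Int)) (by omega) h.2
  omega

-- § padded[i] as a 1-character string, and chunk indexing
def pvCharAt (xs : List Char) (i : Int) : List Char :=
  match PySem.List.pyGet? xs i with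
  | some c => [c]
  | none => []

lemma pv_charAt_natCast (xs : List Char) (x : Nat) (hx : x < xs.length) :
    pvCharAt xs ((x : Nat) : Int) = [xs.getD x ' '] := by
  unfold pvCharAt
  rw [PySem.List.pyGet?_natCast, List.getElem?_eq_getElem hx,
      List.getD_eq_getElem?_getD, List.getElem?_eq_getElem hx]
  rfl

lemma pv_get2_chunks (pad : List Char) (rn cn : Nat) (hpad : pad.length = rn * cn)
    (i j : Nat) (hi : i < rn) (hj : j < cn) :
    pvGet2 ((List.range rn).map (fun i => (pad.drop (i * cn)).take cn)) (i : Int) (j : Int)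
      = pvCharAt pad ((i * cn + j : Nat) : Int) := by
  unfold pvGet2 pvCharAt
  rw [PySem.List.pyGet?_natCast, PySem.List.pyGet?_natCast]
  rw [List.getElem?_eq_getElem (by simpa using hi)]
  simp only [List.getElem_map, List.getElem_range]
  have hlt : i * cn + j < pad.length := by
    rw [hpad]
    calc i * cn + j < i * cn + cn := by omega
    _ = (i+1) * cn := by ring
    _ ≤ rn * cn := Nat.mul_le_mul_right cn (by omega)
  rw [PySem.List.pyGet?_natCast, List.getElem?_take_of_lt hj, List.getElem?_drop,
      List.getElem?_eq_getElem (by omega : i * cn + j < pad.length)]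

-- § modify/flatten plumbing for A's nested-list scatter
lemma pv_modify_append_l {α : Type} (l t : List α) (j : Nat) (f : α → α) (hj : j < l.length) :
    (l ++ t).modify j f = l.modify j f ++ t := by
  induction l generalizing j with
  | nil => simp at hj
  | cons x xs ih =>
    cases j with
    | zero => simp [List.modify_zero_cons]
    | succ n =>
      simp only [List.cons_append, List.modify_succ_cons]
      rw [ih n (by simpa using hj)]

lemma pv_modify_append_r {α : Type} (l t : List α) (j : Nat) (f : α → α) :
    (l ++ t).modify (l.length + j) f = l ++ t.modify j f := by
  induction l with
  | nil => simp
  | cons x xs ih =>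
    simp only [List.cons_append, List.length_cons]
    rw [show xs.length + 1 + j = (xs.length + j) + 1 from by omega, List.modify_succ_cons, ih]

lemma pv_shape_modify {α : Type} (cn : Nat) :
    ∀ (nm : List (List α)) (i : Nat) (g : List α → List α),
    (∀ row ∈ nm, row.length = cn) → (∀ row, (g row).length = row.length) →
    ∀ row ∈ nm.modify i g, row.length = cn := by
  intro nm
  induction nm with
  | nil => simp
  | cons r t ih =>
    intro i g hsh hg
    cases i with
    | zero =>
      intro row hrow
      rcases List.mem_cons.mp (by simpa [List.modify_zero_cons] using hrow) with h | h
      · subst h; rw [hg r]; exact hsh r (by simp)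
      · exact hsh row (by simp [h])
    | succ n =>
      intro row hrow
      rcases List.mem_cons.mp (by simpa [List.modify_succ_cons] using hrow) with h | h
      · subst h; exact hsh row (by simp)
      · exact ih n g (fun rr hr => hsh rr (by simp [hr])) hg row h

lemma pv_flatten_modify (cn : Nat) :
    ∀ (nm : List (List (List Char))) (i j : Nat) (f : List Char → List Char),
    (∀ row ∈ nm, row.length = cn) → i < nm.length → j < cn →
    (nm.modify i (fun row => row.modify j f)).flatten = nm.flatten.modify (i * cn + j) f := by
  intro nm
  induction nm with
  | nil => intro i j f _ h; simp at h
  | cons r t ih =>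
    intro i j f hsh hi hj
    cases i with
    | zero =>
      simp only [List.modify_zero_cons, List.flatten_cons, Nat.zero_mul, Nat.zero_add]
      rw [pv_modify_append_l r t.flatten j _ (by rw [hsh r (by simp)]; omega)]
    | succ n =>
      simp only [List.modify_succ_cons, List.flatten_cons]
      rw [ih n j f (fun rr hr => hsh rr (by simp [hr])) (by simpa using hi) hj]
      have h2 : (n + 1) * cn + j = r.length + (n * cn + j) := by
        rw [hsh r (by simp)]; ring
      rw [h2, pv_modify_append_r]

lemma pv_flatten_len {α : Type} (cn : Nat) :
    ∀ (nm : List (List α)), (∀ row ∈ nm, row.length = cn) → nm.flatten.length = nm.length * cn := by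
  intro nm
  induction nm with
  | nil => simp
  | cons r t ih =>
    intro h
    simp only [List.flatten_cons, List.length_append, List.length_cons, ih (fun rr hr => h rr (by simp [hr])), h r (by simp)]
    ring

lemma pv_fold_swap (cn rn : Nat) (ri ci : Nat → Nat) (val : Nat → List Char) :
    ∀ (ks : List Nat) (nm : List (List (List Char))),
    (∀ row ∈ nm, row.length = cn) → nm.length = rn →
    (∀ k ∈ ks, ri k < rn ∧ ci k < cn) →
    ks.Pairwise (fun a b => ri a * cn + ci a ≠ ri b * cn + ci b) →
    (∀ k ∈ ks, nm.flatten[ri k * cn + ci k]? = some []) →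
    (ks.foldl (fun nm k => nm.modify (ri k) (fun row => row.modify (ci k) (fun cell => cell ++ val k))) nm).flatten
      = ks.foldl (fun a k => a.set (ri k * cn + ci k) (val k)) nm.flatten := by
  intro ks
  induction ks with
  | nil => intro nm _ _ _ _ _; rfl
  | cons k t ih =>
    intro nm hsh hlen hb hp he
    simp only [List.foldl_cons]
    have hbk := hb k (by simp)
    have hdlt : ri k * cn + ci k < nm.flatten.length := by
      rw [pv_flatten_len cn nm hsh, hlen]
      calc ri k * cn + ci k < ri k * cn + cn := by omega
      _ = (ri k + 1) * cn := by ring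
      _ ≤ rn * cn := Nat.mul_le_mul_right cn (by omega)
    have hstep : (nm.modify (ri k) (fun row => row.modify (ci k) (fun cell => cell ++ val k))).flatten
        = nm.flatten.set (ri k * cn + ci k) (val k) := by
      rw [pv_flatten_modify cn nm (ri k) (ci k) _ hsh (by omega) hbk.2]
      rw [List.modify_eq_set_get _ hdlt]
      have : nm.flatten[ri k * cn + ci k] = [] := by
        have := he k (by simp)
        rw [List.getElem?_eq_getElem hdlt] at this
        simpa using this
      simp only [List.get_eq_getElem, this]
      simp
    rw [ih (nm.modify (ri k) (fun row => row.modify (ci k) (fun cell => cell ++ val k)))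
        (pv_shape_modify cn nm (ri k) _ hsh (fun row => List.length_modify _ _ _))
        (by rw [List.length_modify]; exact hlen)
        (fun k' hk' => hb k' (by simp [hk']))
        (List.Pairwise.sublist (List.sublist_cons_self k t) hp)
        ?_ , hstep]
    intro k' hk'
    rw [hstep]
    rw [List.getElem?_set_ne (by exact (List.pairwise_cons.mp hp).1 k' hk')]
    exact he k' (by simp [hk'])

def pvScatter (N : Nat) (d : Nat → Nat) (v : Nat → List Char) : List (List Char) :=
  (List.range N).foldl (fun a k => a.set (d k) (v k)) (List.replicate N [])

-- the permuted flat index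
def pvDest (ro co : List Nat) (cn k : Nat) : Nat := ro.getD (k / cn) 0 * cn + co.getD (k % cn) 0

lemma pv_divmod_decomp (cn x y x' y' : Nat) (hy : y < cn) (hy' : y' < cn)
    (h : x * cn + y = x' * cn + y') : x = x' ∧ y = y' := by
  have h1 : (x * cn + y) / cn = x := by
    rw [Nat.add_comm, Nat.add_mul_div_right _ _ (by omega : 0 < cn), Nat.div_eq_of_lt hy]
    omega
  have h2 : (x' * cn + y') / cn = x' := by
    rw [Nat.add_comm, Nat.add_mul_div_right _ _ (by omega : 0 < cn), Nat.div_eq_of_lt hy']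
    omega
  have hx : x = x' := by rw [← h1, ← h2, h]
  subst hx
  omega

lemma pv_flat_div (a b cn : Nat) (hb : b < cn) : (a * cn + b) / cn = a ∧ (a * cn + b) % cn = b := by
  constructor
  · rw [Nat.add_comm, Nat.add_mul_div_right _ _ (by omega : 0 < cn), Nat.div_eq_of_lt hb]
    omega
  · rw [Nat.add_comm, Nat.add_mul_mod_self_right, Nat.mod_eq_of_lt hb]

lemma pv_dest_inj (ro co : List Nat) (rn cn : Nat)
    (hrn : ro.length = rn) (hcn : co.length = cn)
    (hron : ro.Nodup) (hcon : co.Nodup) (hcolt : ∀ x ∈ co, x < cn) (hcn0 : 0 < cn) :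
    ∀ a b : Nat, a < rn * cn → b < rn * cn → a ≠ b →
      pvDest ro co cn a ≠ pvDest ro co cn b := by
  intro a b ha hb hne heq
  unfold pvDest at heq
  have hadiv : a / cn < rn := (Nat.div_lt_iff_lt_mul hcn0).mpr ha
  have hbdiv : b / cn < rn := (Nat.div_lt_iff_lt_mul hcn0).mpr hb
  have hamod : a % cn < cn := Nat.mod_lt _ hcn0
  have hbmod : b % cn < cn := Nat.mod_lt _ hcn0
  have hcoa : co.getD (a % cn) 0 < cn := by
    rw [List.getD_eq_getElem _ _ (by omega : a % cn < co.length)]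
    exact hcolt _ (List.getElem_mem _)
  have hcob : co.getD (b % cn) 0 < cn := by
    rw [List.getD_eq_getElem _ _ (by omega : b % cn < co.length)]
    exact hcolt _ (List.getElem_mem _)
  obtain ⟨h1, h2⟩ := pv_divmod_decomp cn _ _ _ _ hcoa hcob heq
  rw [List.getD_eq_getElem _ _ (by omega : a / cn < ro.length),
      List.getD_eq_getElem _ _ (by omega : b / cn < ro.length)] at h1
  rw [List.getD_eq_getElem _ _ (by omega : a % cn < co.length),
      List.getD_eq_getElem _ _ (by omega : b % cn < co.length)] at h2
  have hq : a / cn = b / cn := (List.Nodup.getElem_inj_iff hron).mp h1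
  have hr : a % cn = b % cn := (List.Nodup.getElem_inj_iff hcon).mp h2
  apply hne
  calc a = cn * (a / cn) + a % cn := (Nat.div_add_mod a cn).symm
  _ = cn * (b / cn) + b % cn := by rw [hq, hr]
  _ = b := Nat.div_add_mod b cn

lemma pv_A_eq_scatter (pad : List Char) (ro co : List Nat) (rn cn : Nat)
    (hrn : ro.length = rn) (hcn : co.length = cn) (hpad : pad.length = rn * cn)
    (hrolt : ∀ x ∈ ro, x < rn) (hcolt : ∀ x ∈ co, x < cn)
    (hron : ro.Nodup) (hcon : co.Nodup) (decode : Bool) (hcn0 : 0 < cn) :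
    (pvMatrixSwap ((List.range rn).map (fun i => (pad.drop (i * cn)).take cn)) ro co decode).flatten
      = pvScatter (rn * cn)
          (fun k => if decode then k else pvDest ro co cn k)
          (fun k => pvCharAt pad (((if decode then pvDest ro co cn k else k) : Nat) : Int)) := by
  have hdiv : ∀ k : Nat, k < rn * cn → k / cn < rn := fun k hk => (Nat.div_lt_iff_lt_mul hcn0).mpr hk
  have hmod : ∀ k : Nat, k % cn < cn := fun k => Nat.mod_lt _ hcn0
  have hroD : ∀ k : Nat, k < rn * cn → ro.getD (k / cn) 0 < rn := by
    intro k hk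
    rw [List.getD_eq_getElem _ _ (by rw [hrn]; exact hdiv k hk : k / cn < ro.length)]
    exact hrolt _ (List.getElem_mem _)
  have hcoD : ∀ k : Nat, co.getD (k % cn) 0 < cn := by
    intro k
    rw [List.getD_eq_getElem _ _ (by rw [hcn]; exact hmod k : k % cn < co.length)]
    exact hcolt _ (List.getElem_mem _)
  unfold pvMatrixSwap pvScatter
  dsimp only
  rw [hrn, hcn]
  rw [PySem.List.pyRange_zero_natCast (cn * rn), List.foldl_map, Nat.mul_comm cn rn]
  have hnew0 : (PySem.List.pyRange 0 (rn : Int) 1).map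
      (fun _ => (PySem.List.pyRange 0 (cn : Int) 1).map (fun _ => ([] : List Char)))
      = List.replicate rn (List.replicate cn ([] : List Char)) := by
    rw [PySem.List.pyRange_zero_natCast rn, PySem.List.pyRange_zero_natCast cn]
    apply List.ext_getElem
    · simp
    · intro i h1 h2
      simp only [List.getElem_map, List.getElem_range, ← List.map_map, List.map_const',
        List.length_map, List.length_range, List.getElem_replicate]
  rw [hnew0]
  rw [PySem.List.foldl_congr_mem (List.range (rn * cn)) _
    (fun nm (k : Nat) =>
      nm.modify (if decode then k / cn else ro.getD (k / cn) 0)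
        (fun row => row.modify (if decode then k % cn else co.getD (k % cn) 0)
          (fun cell => cell ++ pvCharAt pad (((if decode then pvDest ro co cn k else k) : Nat) : Int)))) _ ?_]
  · rw [pv_fold_swap cn rn
        (fun k => if decode then k / cn else ro.getD (k / cn) 0)
        (fun k => if decode then k % cn else co.getD (k % cn) 0)
        (fun k => pvCharAt pad (((if decode then pvDest ro co cn k else k) : Nat) : Int))
        (List.range (rn * cn)) _ ?_ ?_ ?_ ?_ ?_]
    · rw [List.flatten_replicate_replicate]
      apply PySem.List.foldl_congr_mem
      intro acc k hk
      rw [List.mem_range] at hk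
      congr 1
      cases decode <;> simp only [if_true, if_false, Bool.false_eq_true, ite_false, ite_true]
      · rfl
      · rw [Nat.mul_comm]
        exact Nat.div_add_mod k cn
    · intro row hrow
      exact List.eq_of_mem_replicate hrow ▸ List.length_replicate
    · exact List.length_replicate
    · intro k hk
      rw [List.mem_range] at hk
      cases decode <;> simp only [ite_true, ite_false, Bool.false_eq_true]
      · exact ⟨hroD k hk, hcoD k⟩
      · exact ⟨hdiv k hk, hmod k⟩
    · rw [List.pairwise_iff_getElem]
      intro a b ha hb hab
      simp only [List.getElem_range, List.length_range] at ha hb ⊢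
      cases decode <;> simp only [ite_true, ite_false, Bool.false_eq_true]
      · exact pv_dest_inj ro co rn cn hrn hcn hron hcon hcolt hcn0 a b ha hb (by omega)
      · rw [Nat.mul_comm (a / cn) cn, Nat.mul_comm (b / cn) cn, Nat.div_add_mod, Nat.div_add_mod]
        omega
    · intro k hk
      rw [List.mem_range] at hk
      rw [List.flatten_replicate_replicate]
      rw [List.getElem?_eq_getElem ?hlt]
      case hlt =>
        rw [List.length_replicate]
        cases decode <;> simp only [ite_true, ite_false, Bool.false_eq_true]
        · calc ro.getD (k / cn) 0 * cn + co.getD (k % cn) 0 < ro.getD (k / cn) 0 * cn + cn := by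
                have := hcoD k; omega
          _ = (ro.getD (k / cn) 0 + 1) * cn := by ring
          _ ≤ rn * cn := Nat.mul_le_mul_right cn (by have := hroD k hk; omega)
        · calc k / cn * cn + k % cn < k / cn * cn + cn := by have := hmod k; omega
          _ = (k / cn + 1) * cn := by ring
          _ ≤ rn * cn := Nat.mul_le_mul_right cn (by have := hdiv k hk; omega)
      rw [List.getElem_replicate]
  · intro nm k hk
    rw [List.mem_range] at hk
    have hro_lt : k / cn < ro.length := by rw [hrn]; exact hdiv k hk
    have hco_lt : k % cn < co.length := by rw [hcn]; exact hmod k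
    rw [PySem.Int.floordiv_natCast k cn, PySem.Int.mod_natCast k cn]
    rw [PySem.List.pyGet?_natCast ro (k / cn), PySem.List.pyGet?_natCast co (k % cn)]
    rw [List.getElem?_eq_getElem hro_lt, List.getElem?_eq_getElem hco_lt]
    simp only [Option.getD_some]
    have hgetro : ro[k / cn]'hro_lt = ro.getD (k / cn) 0 := by
      rw [List.getD_eq_getElem _ _ hro_lt]
    have hgetco : co[k % cn]'hco_lt = co.getD (k % cn) 0 := by
      rw [List.getD_eq_getElem _ _ hco_lt]
    cases decode
    · simp only [Bool.false_eq_true, if_false, ite_false]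
      unfold pvModify2
      rw [if_pos ⟨by positivity, by positivity⟩]
      simp only [Int.toNat_natCast]
      rw [pv_get2_chunks pad rn cn hpad (k / cn) (k % cn) (hdiv k hk) (hmod k)]
      rw [hgetro, hgetco]
      rw [show k / cn * cn + k % cn = k from by rw [Nat.mul_comm]; exact Nat.div_add_mod k cn]
    · simp only [if_true, ite_true]
      unfold pvModify2
      rw [if_pos ⟨by positivity, by positivity⟩]
      simp only [Int.toNat_natCast]
      rw [pv_get2_chunks pad rn cn hpad (ro[k / cn]) (co[k % cn])
            (by rw [hgetro]; exact hroD k hk) (by rw [hgetco]; exact hcoD k)]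
      rw [hgetro, hgetco]
      rfl

-- § writing distinct positions: a foldl of set over range N, re-indexed by an inverse
lemma pv_foldl_set_id {α : Type} (w : Nat → α) :
    ∀ (N : Nat) (init : List α), N ≤ init.length →
    (List.range N).foldl (fun a p => a.set p (w p)) init = (List.range N).map w ++ init.drop N := by
  intro N
  induction N with
  | zero => intro init _; simp
  | succ N ih =>
    intro init hlen
    rw [List.range_succ, List.foldl_append, ih init (by omega), List.foldl_cons, List.foldl_nil]
    rw [List.set_append, if_neg (by simp)]
    simp only [List.length_map, List.length_range, Nat.sub_self]
    have hdrop : init.drop N = init.getD N (w N) :: init.drop (N + 1) := by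
      rw [List.getD_eq_getElem _ _ (by omega : N < init.length)]
      exact (List.drop_eq_getElem_cons (by omega)).trans rfl
    rw [hdrop]
    simp [List.map_append, List.set]

lemma pv_foldl_set_reindex {α : Type} (N : Nat) (d dinv : Nat → Nat) (v : Nat → α)
    (init : List α) (hlen : init.length = N)
    (h1 : ∀ k, k < N → d k < N ∧ dinv (d k) = k)
    (h2 : ∀ p, p < N → dinv p < N ∧ d (dinv p) = p) :
    (List.range N).foldl (fun a k => a.set (d k) (v k)) init
      = (List.range N).map (fun p => v (dinv p)) := by
  have hinj : ∀ x ∈ List.range N, ∀ y ∈ List.range N, d x = d y → x = y := by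
    intro x hx y hy h
    rw [List.mem_range] at hx hy
    have := (h1 x hx).2
    rw [h, (h1 y hy).2] at this
    omega
  have hperm : ((List.range N).map dinv).Perm (List.range N) := by
    have hnd : ((List.range N).map dinv).Nodup := by
      apply (List.nodup_map_iff_inj_on List.nodup_range).mpr
      intro x hx y hy h
      rw [List.mem_range] at hx hy
      have := (h2 x hx).2
      rw [h, (h2 y hy).2] at this
      omega
    have hsub : ((List.range N).map dinv) ⊆ List.range N := by
      intro x hx
      rcases List.mem_map.mp hx with ⟨p, hp, rfl⟩
      rw [List.mem_range] at hp ⊢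
      exact (h2 p hp).1
    exact (List.subperm_of_subset hnd hsub).perm_of_length_le (by simp)
  have hcomm : ∀ x ∈ List.range N, ∀ y ∈ List.range N, ∀ (z : List α),
      (z.set (d x) (v x)).set (d y) (v y) = (z.set (d y) (v y)).set (d x) (v x) := by
    intro x hx y hy z
    by_cases hxy : x = y
    · subst hxy; rfl
    · exact List.set_comm _ _ (fun h => hxy (hinj x hx y hy h))
  rw [← List.Perm.foldl_eq' hperm (by
        intro x hx y hy z
        exact hcomm x (hperm.subset hx) y (hperm.subset hy) z) init]
  rw [List.foldl_map]
  rw [PySem.List.foldl_congr_mem _ _ (fun (a : List α) p => a.set p (v (dinv p))) init (by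
    intro a p hp
    rw [List.mem_range] at hp
    rw [(h2 p hp).2])]
  rw [pv_foldl_set_id _ N init (by omega), List.drop_eq_nil_of_le (by omega), List.append_nil]

-- § the grid (gather) form and its flattening
def pvGrid {α : Type} (f : Nat → α) (cn : Nat) (RO CO : List Nat) : List (List α) :=
  RO.map (fun r => CO.map (fun c => f (r * cn + c)))

lemma pv_grid_flatten {α : Type} (f : Nat → α) (cn : Nat) (hcn : 0 < cn) (CO : List Nat)
    (hCO : CO.length = cn) :
    ∀ RO : List Nat, (pvGrid f cn RO CO).flatten
      = (List.range (RO.length * cn)).map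
          (fun p => f (RO.getD (p / cn) 0 * cn + CO.getD (p % cn) 0)) := by
  intro RO
  induction RO with
  | nil => simp [pvGrid]
  | cons r RO ih =>
    show (CO.map (fun c => f (r * cn + c)) ++ (pvGrid f cn RO CO).flatten) = _
    rw [ih, List.length_cons,
        show (RO.length + 1) * cn = cn + RO.length * cn from by ring,
        List.range_add, List.map_append, List.map_map]
    congr 1
    · apply List.ext_getElem
      · simp [hCO]
      · intro p hp hp2
        simp only [List.length_map, hCO] at hp
        simp only [List.getElem_map, List.getElem_range]
        rw [Nat.div_eq_of_lt (by simpa using hp2), Nat.mod_eq_of_lt (by simpa using hp2)]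
        simp only [List.getD_cons_zero]
        rw [List.getD_eq_getElem _ _ (by simpa [hCO] using hp2)]
    · apply List.map_congr_left
      intro q hq
      simp only [Function.comp]
      rw [show cn + q = q + cn from Nat.add_comm cn q,
          Nat.add_div_right q hcn, Nat.add_mod_right q cn]
      simp [List.getD_cons_succ]

lemma pv_flatten_singletons {α : Type} (l : List Nat) (g : Nat → α) :
    (l.map (fun p => [g p])).flatten = l.map g := by
  induction l with
  | nil => rfl
  | cons x t ih => simp [ih]

-- § getD through a map over range
lemma pv_getD_map_range {α : Type} [Inhabited α] (n : Nat) (g : Nat → α) (d : α) (i : Nat)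
    (hi : i < n) : ((List.range n).map g).getD i d = g i := by
  rw [List.getD_eq_getElem _ _ (by simpa using hi)]
  simp

-- § A's argsort is pairwise-increasing under the labels
lemma pv_getD_index (u : List (List Char)) (v : List Char) (hv : v ∈ u) :
    u.getD ((PySem.List.index? u v).getD 0) [] = v := by
  have hs : (PySem.List.index? u v).isSome := (PySem.List.index?_isSome_iff u v).mpr hv
  rcases Option.isSome_iff_exists.mp hs with ⟨k, hk⟩
  rcases PySem.List.getElem_of_index?_eq_some hk with ⟨hlt, hget, _⟩
  rw [hk]
  simp only [Option.getD_some]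
  rw [List.getD_eq_getElem _ _ hlt]
  exact hget

-- the ports elaborate `sorted` with List.instLT / List.decidableLT; the PySem order lemmas
-- use the LinearOrder instances — the two are definitionally equal
lemma pv_sorted_bridge {α : Type} (xs : List α) (key : α → List Char) (rev : Bool) :
    @PySem.List.sorted α (List Char) List.instLT (fun a b => a.decidableLT b) xs key rev
      = @PySem.List.sorted α (List Char) List.instLinearOrder.toLT LinearOrder.toDecidableLT xs key rev := by
  congr 1 <;> rfl

lemma pv_argsort_pairwise (u : List (List Char)) (hu : u.Nodup) :
    (pvArgsort u).Pairwise (fun i j => u.getD i [] < u.getD j []) := by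
  unfold pvArgsort
  rw [pv_sorted_bridge, List.pairwise_map]
  have hps := PySem.List.sorted_pairwise u (fun x => x)
  have hnd : List.Pairwise (fun a b => a ≠ b)
      (@PySem.List.sorted _ _ List.instLinearOrder.toLT LinearOrder.toDecidableLT u (fun x => x) false) :=
    ((@PySem.List.sorted_perm _ _ List.instLinearOrder.toLT LinearOrder.toDecidableLT u (fun x => x) false).nodup_iff).mpr hu
  refine (hps.and hnd).imp_of_mem ?_
  intro a b ha hb hab
  have ha' : a ∈ u :=
    (@PySem.List.mem_sorted _ _ List.instLinearOrder.toLT LinearOrder.toDecidableLT u (fun x => x) false a).mp ha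
  have hb' : b ∈ u :=
    (@PySem.List.mem_sorted _ _ List.instLinearOrder.toLT LinearOrder.toDecidableLT u (fun x => x) false b).mp hb
  rw [pv_getD_index u a ha', pv_getD_index u b hb']
  exact lt_of_le_of_ne hab.1 hab.2

lemma pv_argsort_lt (u : List (List Char)) (hu : u.Nodup) {i : Nat} (hi : i ∈ pvArgsort u) :
    i < u.length := List.mem_range.mp ((pv_argsort_perm u hu).mem_iff.mp hi)

-- § B's sorted-range order equals A's argsort (cast to Int)
lemma pv_sorted_range_eq (u : List (List Char)) (n : Nat) (hu : u.Nodup) (hlen : u.length = n)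
    (keyfn : Int → List Char) (hkey : ∀ t : Nat, t < n → keyfn ((t : Nat) : Int) = u.getD t []) :
    PySem.List.sorted (PySem.List.pyRange 0 ((n : Nat) : Int) 1) keyfn false
      = (pvArgsort u).map (fun i : Nat => ((i : Nat) : Int)) := by
  rw [pv_sorted_bridge]
  apply PySem.List.sorted_eq_of_perm_of_pairwise_lt
  · rw [PySem.List.pyRange_zero_natCast]
    exact ((hlen ▸ pv_argsort_perm u hu).map _)
  · rw [List.pairwise_map]
    refine (pv_argsort_pairwise u hu).imp_of_mem ?_
    intro a b ha hb hab
    rw [hkey a (hlen ▸ pv_argsort_lt u hu ha), hkey b (hlen ▸ pv_argsort_lt u hu hb)]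
    exact hab

-- the B row/column label functions agree with the pvUR/pvUC entries
lemma pv_keyR_eq (rep : List Char) (rn : Nat) (hrep : rep.length = rn) (t : Nat) (ht : t < rn) :
    ((PySem.List.pyGet? rep (((rn : Nat) : Int) - 1 - ((t : Nat) : Int))).getD ' ')
      :: PySem.Int.toChars (((rn : Nat) : Int) - 1 - ((t : Nat) : Int))
    = (pvUR rep ((rn : Nat) : Int)).getD t [] := by
  unfold pvUR
  rw [PySem.List.pyRange_zero_natCast, List.map_map]
  have hcast : ((rn : Nat) : Int) - 1 - ((t : Nat) : Int) = ((rn - 1 - t : Nat) : Int) := by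
    push_cast; omega
  rw [hcast, PySem.List.pyGet?_natCast]
  rw [List.getD_eq_getElem _ _ (by simp; omega)]
  rw [List.getElem_reverse]
  simp only [List.getElem_map, List.getElem_range, Function.comp, List.length_map,
    List.length_range]
  rw [PySem.List.pyGet?_natCast]

lemma pv_keyC_eq (rep : List Char) (cn : Nat) (hrep : rep.length = cn) (j : Nat) (hj : j < cn) :
    ((PySem.List.pyGet? rep ((j : Nat) : Int)).getD ' ')
      :: PySem.Int.toChars (((cn : Nat) : Int) - 1 - ((j : Nat) : Int))
    = (pvUC rep ((cn : Nat) : Int)).getD j [] := by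
  unfold pvUC
  rw [PySem.List.pyRange_zero_natCast, List.map_map]
  rw [List.getD_eq_getElem _ _ (by simp; omega)]
  simp only [List.getElem_map, List.getElem_range, Function.comp]

-- § pvInvert computes the inverse permutation
lemma pv_invert_eq (p : List Nat) (n : Nat) (hp : p.Perm (List.range n)) :
    pvInvert (p.map (fun i : Nat => ((i : Nat) : Int)))
      = (List.range n).map (fun j => ((List.idxOf j p : Nat) : Int)) := by
  have hlen : p.length = n := by simpa using hp.length_eq
  have hnd : p.Nodup := (hp.nodup_iff).mpr List.nodup_range
  have hmem : ∀ x ∈ p, x < n := fun x hx => List.mem_range.mp (hp.subset hx)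
  unfold pvInvert
  rw [PySem.List.enumerate_eq_map_pyRange _ (0 : Int)]
  have hlen2 : PySem.List.len (p.map (fun i : Nat => ((i : Nat) : Int))) = ((n : Nat) : Int) := by
    simp [PySem.List.len, hlen]
  rw [hlen2, PySem.List.pyRange_zero_natCast, List.map_map, List.foldl_map]
  rw [List.length_map, hlen]
  rw [PySem.List.foldl_congr_mem _ _
      (fun (a : List Int) (k : Nat) => a.set (p.getD k 0) ((k : Nat) : Int)) _ ?_]
  · exact pv_foldl_set_reindex n (fun k => p.getD k 0) (fun j => List.idxOf j p)
      (fun k => ((k : Nat) : Int)) _ (by simp)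
      (by
        intro k hk
        have hklt : k < p.length := by omega
        show p.getD k 0 < n ∧ List.idxOf (p.getD k 0) p = k
        rw [List.getD_eq_getElem _ _ hklt]
        exact ⟨hmem _ (List.getElem_mem _), List.Nodup.idxOf_getElem hnd k hklt⟩)
      (by
        intro j hj
        have hjp : j ∈ p := hp.mem_iff.mpr (List.mem_range.mpr hj)
        have hidx : List.idxOf j p < p.length := List.idxOf_lt_length_of_mem hjp
        show List.idxOf j p < n ∧ p.getD (List.idxOf j p) 0 = j
        refine ⟨by omega, ?_⟩
        rw [List.getD_eq_getElem _ _ hidx]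
        exact List.getElem_idxOf hidx)
  · intro a k hk
    rw [List.mem_range] at hk
    have hklt : k < p.length := by omega
    simp only [Function.comp]
    rw [PySem.List.pyGetD_natCast]
    rw [List.getD_eq_getElem _ _ (by simpa using hklt)]
    simp only [List.getElem_map]
    rw [PySem.List.pySetD_natCast]
    rw [List.getD_eq_getElem _ _ hklt]

-- § B's staged gather equals the grid
lemma pv_row_slice (pad : List Char) (rn cn : Nat) (hpad : pad.length = rn * cn)
    (r : Nat) (hr : r < rn) :
    PySem.List.slice pad (some (((r : Nat) : Int) * ((cn : Nat) : Int)))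
        (some ((((r : Nat) : Int) + 1) * ((cn : Nat) : Int)))
      = (pad.drop (r * cn)).take cn := by
  rw [show ((r : Nat) : Int) * ((cn : Nat) : Int) = ((r * cn : Nat) : Int) from by push_cast; ring,
      show (((r : Nat) : Int) + 1) * ((cn : Nat) : Int) = (((r + 1) * cn : Nat) : Int) from by push_cast; ring]
  rw [PySem.List.slice_natCast]
  congr 1
  rw [Nat.succ_mul]
  omega

lemma pv_rowPiece_eq (pad : List Char) (rn cn : Nat) (hpad : pad.length = rn * cn)
    (COB : List Nat) (hcolt : ∀ c ∈ COB, c < cn) (r : Nat) (hr : r < rn) :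
    pvRowPiece pad (COB.map (fun i : Nat => ((i : Nat) : Int))) ((cn : Nat) : Int) ((r : Nat) : Int)
      = COB.map (fun c => pad.getD (r * cn + c) ' ') := by
  unfold pvRowPiece
  rw [pv_row_slice pad rn cn hpad r hr]
  rw [List.foldl_map, PySem.List.foldl_append_eq_flatMap, List.nil_append, List.flatMap_def]
  have hmap : COB.map (fun c : Nat =>
        (match PySem.List.pyGet? ((pad.drop (r * cn)).take cn) ((c : Nat) : Int) with
          | some ch => [ch] | none => ([] : List Char)))
      = COB.map (fun c => [pad.getD (r * cn + c) ' ']) := by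
    apply List.map_congr_left
    intro c hc
    have hclt := hcolt c hc
    have hlt : r * cn + c < pad.length := by
      rw [hpad]
      calc r * cn + c < r * cn + cn := by omega
      _ = (r + 1) * cn := by ring
      _ ≤ rn * cn := Nat.mul_le_mul_right cn (by omega)
    rw [PySem.List.pyGet?_natCast, List.getElem?_take_of_lt hclt, List.getElem?_drop,
        List.getElem?_eq_getElem (by omega : r * cn + c < pad.length)]
    rw [List.getD_eq_getElem _ _ hlt]
  rw [hmap, pv_flatten_singletons]

lemma pv_B_pieces_eq_grid (pad : List Char) (rn cn : Nat) (hpad : pad.length = rn * cn)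
    (ROB COB : List Nat) (hrolt : ∀ r ∈ ROB, r < rn) (hcolt : ∀ c ∈ COB, c < cn) :
    (ROB.map (fun i : Nat => ((i : Nat) : Int))).foldl
        (fun acc r => acc ++ [pvRowPiece pad (COB.map (fun i : Nat => ((i : Nat) : Int))) ((cn : Nat) : Int) r]) []
      = pvGrid (fun x => pad.getD x ' ') cn ROB COB := by
  rw [PySem.List.foldl_append_singleton_eq_map, List.nil_append, List.map_map]
  unfold pvGrid
  apply List.map_congr_left
  intro r hr
  simp only [Function.comp]
  exact pv_rowPiece_eq pad rn cn hpad COB hcolt r (hrolt r hr)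

-- § the two-sided inverse conditions for the scatter destination
lemma pv_dest_two_sided (ro co : List Nat) (rn cn : Nat)
    (hperm_r : ro.Perm (List.range rn)) (hperm_c : co.Perm (List.range cn)) (hcn0 : 0 < cn) :
    (∀ k, k < rn * cn → pvDest ro co cn k < rn * cn ∧
        List.idxOf (pvDest ro co cn k / cn) ro * cn + List.idxOf (pvDest ro co cn k % cn) co = k) ∧
    (∀ p, p < rn * cn →
        (List.idxOf (p / cn) ro * cn + List.idxOf (p % cn) co < rn * cn ∧
         pvDest ro co cn (List.idxOf (p / cn) ro * cn + List.idxOf (p % cn) co) = p)) := by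
  have hrlen : ro.length = rn := by simpa using hperm_r.length_eq
  have hclen : co.length = cn := by simpa using hperm_c.length_eq
  have hrnd : ro.Nodup := (hperm_r.nodup_iff).mpr List.nodup_range
  have hcnd : co.Nodup := (hperm_c.nodup_iff).mpr List.nodup_range
  have hrmem : ∀ x ∈ ro, x < rn := fun x hx => List.mem_range.mp (hperm_r.subset hx)
  have hcmem : ∀ x ∈ co, x < cn := fun x hx => List.mem_range.mp (hperm_c.subset hx)
  constructor
  · intro k hk
    have hdivk : k / cn < rn := (Nat.div_lt_iff_lt_mul hcn0).mpr hk
    have hmodk : k % cn < cn := Nat.mod_lt _ hcn0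
    have hro_lt : k / cn < ro.length := by omega
    have hco_lt : k % cn < co.length := by omega
    have hroget : ro.getD (k / cn) 0 = ro[k / cn] := List.getD_eq_getElem _ _ hro_lt
    have hcoget : co.getD (k % cn) 0 = co[k % cn] := List.getD_eq_getElem _ _ hco_lt
    have hrob : ro[k / cn] < rn := hrmem _ (List.getElem_mem _)
    have hcob : co[k % cn] < cn := hcmem _ (List.getElem_mem _)
    have hdlt : pvDest ro co cn k < rn * cn := by
      unfold pvDest
      rw [hroget, hcoget]
      calc ro[k / cn] * cn + co[k % cn] < ro[k / cn] * cn + cn := by omega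
      _ = (ro[k / cn] + 1) * cn := by ring
      _ ≤ rn * cn := Nat.mul_le_mul_right cn (by omega)
    refine ⟨hdlt, ?_⟩
    have hdm : pvDest ro co cn k / cn = ro[k / cn] ∧ pvDest ro co cn k % cn = co[k % cn] := by
      unfold pvDest
      rw [hroget, hcoget]
      exact pv_flat_div _ _ cn hcob
    rw [hdm.1, hdm.2, List.Nodup.idxOf_getElem hrnd _ hro_lt, List.Nodup.idxOf_getElem hcnd _ hco_lt]
    rw [Nat.mul_comm]
    exact Nat.div_add_mod k cn
  · intro p hp
    have hdivp : p / cn < rn := (Nat.div_lt_iff_lt_mul hcn0).mpr hp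
    have hmodp : p % cn < cn := Nat.mod_lt _ hcn0
    have hdp : p / cn ∈ ro := hperm_r.mem_iff.mpr (List.mem_range.mpr hdivp)
    have hmp : p % cn ∈ co := hperm_c.mem_iff.mpr (List.mem_range.mpr hmodp)
    have hidxr : List.idxOf (p / cn) ro < ro.length := List.idxOf_lt_length_of_mem hdp
    have hidxc : List.idxOf (p % cn) co < co.length := List.idxOf_lt_length_of_mem hmp
    have hlt : List.idxOf (p / cn) ro * cn + List.idxOf (p % cn) co < rn * cn := by
      calc List.idxOf (p / cn) ro * cn + List.idxOf (p % cn) co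
          < List.idxOf (p / cn) ro * cn + cn := by omega
      _ = (List.idxOf (p / cn) ro + 1) * cn := by ring
      _ ≤ rn * cn := Nat.mul_le_mul_right cn (by omega)
    refine ⟨hlt, ?_⟩
    have hdm := pv_flat_div (List.idxOf (p / cn) ro) (List.idxOf (p % cn) co) cn (by omega)
    unfold pvDest
    rw [hdm.1, hdm.2]
    rw [List.getD_eq_getElem _ _ hidxr, List.getD_eq_getElem _ _ hidxc]
    rw [List.getElem_idxOf hidxr, List.getElem_idxOf hidxc]
    rw [Nat.mul_comm]
    exact Nat.div_add_mod p cn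

-- § support lemmas for bestMatrix
lemma pv_ceilSqrt_le (L : Nat) : (L : Int) ≤ pvCeilSqrt L * pvCeilSqrt L := by
  unfold pvCeilSqrt
  dsimp only
  split_ifs with h
  · exact_mod_cast (le_of_eq h.symm)
  · have h2 : L < (Nat.sqrt L + 1) * (Nat.sqrt L + 1) := by
      have := Nat.lt_succ_sqrt' L
      simpa [Nat.succ_eq_add_one, pow_two] using this
    push_cast
    exact_mod_cast Nat.le_of_lt h2

lemma pv_ceilSqrt_pos (L : Nat) (h : 0 < L) : 0 < pvCeilSqrt L := by
  unfold pvCeilSqrt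
  dsimp only
  split_ifs with he
  · have h1 : 0 < Nat.sqrt L * Nat.sqrt L := by rw [he]; exact h
    have : 0 < Nat.sqrt L := by positivity
    exact_mod_cast this
  · positivity

lemma pv_best_le (L : Nat) : (L : Int) ≤ (pvBestMatrix L).1 * (pvBestMatrix L).2 := by
  unfold pvBestMatrix
  dsimp only
  split_ifs with h
  · exact h
  · exact pv_ceilSqrt_le L

lemma pv_best_pos (L : Nat) (h : 0 < L) : 0 < (pvBestMatrix L).1 ∧ 0 < (pvBestMatrix L).2 := by
  unfold pvBestMatrix
  dsimp only
  have hs := pv_ceilSqrt_pos L h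
  split_ifs with hb
  · refine ⟨hs, ?_⟩
    by_contra hc
    push_neg at hc
    have : pvCeilSqrt L * (pvCeilSqrt L - 1) ≤ 0 := mul_nonpos_of_nonneg_of_nonpos (by omega) (by omega)
    omega
  · exact ⟨hs, hs⟩

lemma pv_makeMatrix_eq (msg : List Char) (rn cn : Nat)
    (h1 : (pvBestMatrix msg.length).1 = (rn : Int)) (h2 : (pvBestMatrix msg.length).2 = (cn : Int))
    (hle : msg.length ≤ rn * cn) :
    pvMakeMatrix msg =
      ((List.range rn).map
        (fun i => (((msg ++ List.replicate (rn * cn - msg.length) ' ').drop (i * cn)).take cn)),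
       (rn : Int), (cn : Int)) := by
  unfold pvMakeMatrix
  dsimp only
  rw [h1, h2]
  have htoNat : ((rn : Int) * (cn : Int) - (msg.length : Int)).toNat = rn * cn - msg.length := by
    push_cast
    omega
  rw [htoNat]
  rw [PySem.List.foldl_append_singleton_eq_map, List.nil_append]
  rw [PySem.List.pyRange_zero_natCast rn, List.map_map]
  simp only [Prod.mk.injEq]
  refine ⟨List.map_congr_left ?_, trivial⟩
  intro i hi
  rw [List.mem_range] at hi
  simp only [Function.comp]
  exact pv_row_slice _ rn cn (by rw [List.length_append, List.length_replicate]; omega) i hi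

lemma pv_pyRangeMap_length {α : Type} (f : Int → α) (n : Nat) :
    ((PySem.List.pyRange 0 (n : Int) 1).map f).length = n := by
  rw [PySem.List.pyRange_zero_natCast]
  simp

lemma pv_UR_length (rep : List Char) (n : Nat) : (pvUR rep (n : Int)).length = n := by
  unfold pvUR
  rw [List.length_reverse]
  exact pv_pyRangeMap_length _ n

lemma pv_UC_length (rep : List Char) (n : Nat) : (pvUC rep (n : Int)).length = n := by
  unfold pvUC
  exact pv_pyRangeMap_length _ n

-- ===== VERDICT (by name: the statement is the Claim_ definition above) =====
theorem transpositionCiphering_spec : Claim_equal_transpositionCiphering := by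
  unfold Claim_equal_transpositionCiphering
  intro key message decode _ hpre
  unfold Spec_transpositionCiphering
  unfold Pre_transpositionCiphering at hpre
  have hkey : 0 < key.toList.length := by
    rw [PySem.Str.strIsalpha_eq] at hpre
    unfold PySem.Chars.strIsalpha at hpre
    rcases Bool.and_eq_true_iff.mp hpre with ⟨h1, _⟩
    cases hl : key.toList with
    | nil => rw [hl] at h1; simp at h1
    | cons c t => simp
  rcases Nat.eq_zero_or_pos message.toList.length with hL | hL
  · -- empty message: both sides are ""
    have hmsg : message.toList = [] := List.length_eq_zero_iff.mp hL
    unfold transpositionCiphering transpositionCiphering_alt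
    dsimp only
    rw [hmsg]
    rw [show pvMakeMatrix [] = ([], 0, -1) from by decide]
    dsimp only
    rw [pv_makeOrder_eq key.toList 0 (-1) hkey le_rfl (Or.inr rfl)]
    dsimp only
    have hUR0 : pvUR (PySem.List.slice (PySem.List.pyRepeat key.toList (pvCeilDiv 0 (key.toList.length : Int))) none (some 0)) 0 = [] := by
      unfold pvUR
      rw [show PySem.List.pyRange 0 (0 : Int) 1 = [] from by decide]
      simp
    have hUC0 : pvUC (PySem.List.slice (PySem.List.pyRepeat key.toList (pvCeilDiv (-1) (key.toList.length : Int))) none (some (-1))) (-1) = [] := by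
      unfold pvUC
      rw [show PySem.List.pyRange 0 (-1 : Int) 1 = [] from by decide]
      simp
    rw [hUR0, hUC0]
    rw [show pvArgsort [] = [] from by decide]
    rw [show pvMatrixSwap [] [] [] decode = [] from by cases decode <;> decide]
    rw [show pvBestMatrix ([] : List Char).length = (0, -1) from by decide]
    dsimp only
    have hko : pvKeyOrders key.toList 0 (-1) = ([], []) := by
      unfold pvKeyOrders
      dsimp only
      rw [show PySem.List.pyRange 0 (0 : Int) 1 = [] from by decide,
          show PySem.List.pyRange 0 (-1 : Int) 1 = [] from by decide]
      rfl
    rw [hko]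
    dsimp only
    have hro : (if decode then ([] : List Int) else pvInvert []) = [] := by cases decode <;> rfl
    rw [hro]
    simp
  · -- nonempty message
    obtain ⟨hr1, hr2⟩ := pv_best_pos message.toList.length hL
    have h1 : (pvBestMatrix message.toList.length).1 = (((pvBestMatrix message.toList.length).1.toNat : Nat) : Int) :=
      (Int.toNat_of_nonneg (by omega)).symm
    have h2 : (pvBestMatrix message.toList.length).2 = (((pvBestMatrix message.toList.length).2.toNat : Nat) : Int) :=
      (Int.toNat_of_nonneg (by omega)).symm
    generalize hrn : (pvBestMatrix message.toList.length).1.toNat = rn at h1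
    generalize hcn : (pvBestMatrix message.toList.length).2.toNat = cn at h2
    have hrn0 : 0 < rn := by omega
    have hcn0 : 0 < cn := by omega
    have hle : message.toList.length ≤ rn * cn := by
      have hb := pv_best_le message.toList.length
      rw [h1, h2] at hb
      exact_mod_cast hb
    set padded := message.toList ++ List.replicate (rn * cn - message.toList.length) ' ' with hpadded
    have hpadlen : padded.length = rn * cn := by
      rw [hpadded, List.length_append, List.length_replicate]
      omega
    set repR := PySem.List.slice (PySem.List.pyRepeat key.toList (pvCeilDiv ((rn : Nat) : Int) (key.toList.length : Int))) none (some ((rn : Nat) : Int)) with hrepR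
    set repC := PySem.List.slice (PySem.List.pyRepeat key.toList (pvCeilDiv ((cn : Nat) : Int) (key.toList.length : Int))) none (some ((cn : Nat) : Int)) with hrepC
    have hrepRlen : repR.length = rn := by
      rw [hrepR, pv_rep_length key.toList _ hkey (by positivity)]
      omega
    have hrepClen : repC.length = cn := by
      rw [hrepC, pv_rep_length key.toList _ hkey (by positivity)]
      omega
    set uR := pvUR repR ((rn : Nat) : Int) with huR
    set uC := pvUC repC ((cn : Nat) : Int) with huC
    have huRnd : uR.Nodup := pv_uniqueRow_nodup repR rn
    have huCnd : uC.Nodup := pv_uniqueCol_nodup repC cn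
    have huRlen : uR.length = rn := pv_UR_length repR rn
    have huClen : uC.length = cn := pv_UC_length repC cn
    set roA := pvArgsort uR with hroA
    set coA := pvArgsort uC with hcoA
    have hroAlen : roA.length = rn := by rw [hroA, pv_argsort_length, huRlen]
    have hcoAlen : coA.length = cn := by rw [hcoA, pv_argsort_length, huClen]
    have hroAperm : roA.Perm (List.range rn) := huRlen ▸ pv_argsort_perm uR huRnd
    have hcoAperm : coA.Perm (List.range cn) := huClen ▸ pv_argsort_perm uC huCnd
    have hroAnd : roA.Nodup := (hroAperm.nodup_iff).mpr List.nodup_range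
    have hcoAnd : coA.Nodup := (hcoAperm.nodup_iff).mpr List.nodup_range
    have hroAb : ∀ x ∈ roA, x < rn := fun x hx => List.mem_range.mp (hroAperm.subset hx)
    have hcoAb : ∀ x ∈ coA, x < cn := fun x hx => List.mem_range.mp (hcoAperm.subset hx)
    -- B's key orders are A's argsorts, cast to Int
    have hkoR : PySem.List.sorted (PySem.List.pyRange 0 ((rn : Nat) : Int) 1)
        (fun t => ((PySem.List.pyGet? repR (((rn : Nat) : Int) - 1 - t)).getD ' ')
          :: PySem.Int.toChars (((rn : Nat) : Int) - 1 - t)) false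
        = roA.map (fun i : Nat => ((i : Nat) : Int)) := by
      apply pv_sorted_range_eq uR rn huRnd huRlen
      intro t ht
      exact pv_keyR_eq repR rn hrepRlen t ht
    have hkoC : PySem.List.sorted (PySem.List.pyRange 0 ((cn : Nat) : Int) 1)
        (fun j => ((PySem.List.pyGet? repC j).getD ' ')
          :: PySem.Int.toChars (((cn : Nat) : Int) - 1 - j)) false
        = coA.map (fun i : Nat => ((i : Nat) : Int)) := by
      apply pv_sorted_range_eq uC cn huCnd huClen
      intro j hj
      exact pv_keyC_eq repC cn hrepClen j hj
    have hko : pvKeyOrders key.toList ((rn : Nat) : Int) ((cn : Nat) : Int)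
        = (roA.map (fun i : Nat => ((i : Nat) : Int)), coA.map (fun i : Nat => ((i : Nat) : Int))) := by
      unfold pvKeyOrders
      dsimp only
      rw [← hrepR, ← hrepC, hkoR, hkoC]
    -- A reduced to the scatter form
    unfold transpositionCiphering
    dsimp only
    rw [pv_makeMatrix_eq message.toList rn cn h1 h2 hle]
    dsimp only
    rw [pv_makeOrder_eq key.toList ((rn : Nat) : Int) ((cn : Nat) : Int) hkey (by positivity) (Or.inl (by positivity))]
    rw [← hrepR, ← hrepC, ← huR, ← huC, ← hroA, ← hcoA]
    dsimp only
    rw [PySem.List.foldl_append_eq_flatMap, List.nil_append]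
    rw [List.flatMap_def, ← List.flatten_flatten]
    rw [← hpadded]
    rw [pv_A_eq_scatter padded roA coA rn cn hroAlen hcoAlen hpadlen hroAb hcoAb hroAnd hcoAnd decode hcn0]
    -- B reduced to the grid form
    unfold transpositionCiphering_alt
    dsimp only
    rw [h1, h2, hko]
    dsimp only
    rw [show (((rn : Nat) : Int) * ((cn : Nat) : Int) - ((message.toList.length : Nat) : Int)).toNat
        = rn * cn - message.toList.length from by push_cast; omega]
    rw [← hpadded]
    cases decode
    · -- encode: scatter through dest; B gathers through the inverse permutations
      simp only [Bool.false_eq_true, if_false]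
      rw [pv_invert_eq roA rn hroAperm, pv_invert_eq coA cn hcoAperm]
      rw [show (List.range rn).map (fun j => ((List.idxOf j roA : Nat) : Int))
            = ((List.range rn).map (fun j => List.idxOf j roA)).map (fun i : Nat => ((i : Nat) : Int)) from by
          rw [List.map_map]; rfl,
          show (List.range cn).map (fun j => ((List.idxOf j coA : Nat) : Int))
            = ((List.range cn).map (fun j => List.idxOf j coA)).map (fun i : Nat => ((i : Nat) : Int)) from by
          rw [List.map_map]; rfl]
      rw [pv_B_pieces_eq_grid padded rn cn hpadlen _ _
            (by
              intro r hr
              rcases List.mem_map.mp hr with ⟨j, hj, rfl⟩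
              rw [List.mem_range] at hj
              have : j ∈ roA := hroAperm.mem_iff.mpr (List.mem_range.mpr hj)
              have := List.idxOf_lt_length_of_mem this
              omega)
            (by
              intro c hc
              rcases List.mem_map.mp hc with ⟨j, hj, rfl⟩
              rw [List.mem_range] at hj
              have : j ∈ coA := hcoAperm.mem_iff.mpr (List.mem_range.mpr hj)
              have := List.idxOf_lt_length_of_mem this
              omega)]
      rw [pv_grid_flatten _ cn hcn0 _ (by simp) _]
      obtain ⟨hts1, hts2⟩ := pv_dest_two_sided roA coA rn cn hroAperm hcoAperm hcn0
      unfold pvScatter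
      rw [pv_foldl_set_reindex (rn * cn) (fun k => pvDest roA coA cn k)
            (fun p => List.idxOf (p / cn) roA * cn + List.idxOf (p % cn) coA)
            (fun k => pvCharAt padded ((k : Nat) : Int)) _ (by simp)
            (fun k hk => hts1 k hk) (fun p hp => hts2 p hp)]
      rw [List.length_map, List.length_range]
      have hA : (List.range (rn * cn)).map
            (fun p => pvCharAt padded (((List.idxOf (p / cn) roA * cn + List.idxOf (p % cn) coA : Nat)) : Int))
          = (List.range (rn * cn)).map
            (fun p => [padded.getD (List.idxOf (p / cn) roA * cn + List.idxOf (p % cn) coA) ' ']) := by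
        apply List.map_congr_left
        intro p hp
        rw [List.mem_range] at hp
        have hlt : List.idxOf (p / cn) roA * cn + List.idxOf (p % cn) coA < rn * cn := (hts2 p hp).1
        exact pv_charAt_natCast padded _ (by omega)
      rw [hA, pv_flatten_singletons]
      apply congrArg String.ofList
      apply List.map_congr_left
      intro p hp
      rw [List.mem_range] at hp
      have hdivp : p / cn < rn := (Nat.div_lt_iff_lt_mul hcn0).mpr hp
      have hmodp : p % cn < cn := Nat.mod_lt _ hcn0
      rw [pv_getD_map_range rn _ 0 _ hdivp, pv_getD_map_range cn _ 0 _ hmodp]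
    · -- decode: the scatter is position-preserving; B gathers through the orders directly
      simp only [if_true]
      rw [show roA.map (fun i : Nat => ((i : Nat) : Int)) = roA.map (fun i : Nat => ((i : Nat) : Int)) from rfl]
      rw [pv_B_pieces_eq_grid padded rn cn hpadlen roA coA hroAb hcoAb]
      rw [pv_grid_flatten _ cn hcn0 _ hcoAlen _]
      rw [hroAlen]
      unfold pvScatter
      rw [pv_foldl_set_reindex (rn * cn) (fun k => k) (fun p => p)
            (fun k => pvCharAt padded (((pvDest roA coA cn k : Nat)) : Int)) _ (by simp)
            (fun k hk => ⟨hk, rfl⟩) (fun p hp => ⟨hp, rfl⟩)]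
      have hdlt : ∀ p, p < rn * cn → pvDest roA coA cn p < rn * cn := by
        intro p hp
        have hdivp : p / cn < rn := (Nat.div_lt_iff_lt_mul hcn0).mpr hp
        have hmodp : p % cn < cn := Nat.mod_lt _ hcn0
        unfold pvDest
        have hro : roA.getD (p / cn) 0 < rn := by
          rw [List.getD_eq_getElem _ _ (by omega : p / cn < roA.length)]
          exact hroAb _ (List.getElem_mem _)
        have hco : coA.getD (p % cn) 0 < cn := by
          rw [List.getD_eq_getElem _ _ (by omega : p % cn < coA.length)]
          exact hcoAb _ (List.getElem_mem _)
        calc roA.getD (p / cn) 0 * cn + coA.getD (p % cn) 0 < roA.getD (p / cn) 0 * cn + cn := by omega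
        _ = (roA.getD (p / cn) 0 + 1) * cn := by ring
        _ ≤ rn * cn := Nat.mul_le_mul_right cn (by omega)
      have hA : (List.range (rn * cn)).map
            (fun p => pvCharAt padded (((pvDest roA coA cn p : Nat)) : Int))
          = (List.range (rn * cn)).map (fun p => [padded.getD (pvDest roA coA cn p) ' ']) := by
        apply List.map_congr_left
        intro p hp
        rw [List.mem_range] at hp
        exact pv_charAt_natCast padded _ (hpadlen ▸ hdlt p hp)
      rw [hA, pv_flatten_singletons]
      apply congrArg String.ofList
      apply List.map_congr_left
      intro p hp
      unfold pvDest
      rfl
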